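-- pv_equiv track=rewrite | github.com/akkerman/advent_of_code | 2016/13.py | part_two
-- ===== SOURCE A (Python) =====
-- from collections import deque
--
-- class Office:
--     def __init__(self, favo):
--         self.favo = favo
--
--     def is_open(self, x, y):
--         a = x*x + 3*x + 2*x*y + y + y*y + self.favo
--         return bin(a).count("1") % 2 == 0
--
--     def is_ok(self, x, y):
--         if x < 0 or y < 0:
--             return False
--         return self.is_open(x, y)
--
--     def neighbours(self, x, y):
--         xs = [(x-1, y), (x+1, y), (x, y-1), (x,y+1)]
--         return [(x,y) for x,y in xs if self.is_ok(x,y)]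
--
-- def part_two(favo):
--     """ part two """
--     office = Office(favo)
--
--     q = deque()
--     q.append((1,1,0))
--     visited = set()
--
--     while True:
--         if len(q) == 0:
--             break
--
--         x,y,steps = q.popleft()
--         if (x,y) in visited:
--             continue
--         if steps > 50:
--             continue
--
--         visited.add((x,y))
--
--         for nx, ny in office.neighbours(x,y):
--             q.append((nx,ny,steps+1))
--
--     return len(visited)
-- ===== SOURCE B (Python) =====
-- def part_two(favo):
--     """ part two """
--     N, WALL = 52, 51
--
--     def is_open(x, y):
--         a = x*x + 3*x + 2*x*y + y + y*y + favo
--         return bin(a).count("1") % 2 == 0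
--
--     def relax(dist, x, y):
--         if (x, y) != (1, 1) and not is_open(x, y):
--             return WALL
--         best = dist[x][y]
--         for nx, ny in ((x - 1, y), (x + 1, y), (x, y - 1), (x, y + 1)):
--             if 0 <= nx < N and 0 <= ny < N and dist[nx][ny] + 1 < best:
--                 best = dist[nx][ny] + 1
--         return best
--
--     row = [WALL] * N
--     dist = [row[:] for _ in range(N)]
--     dist[1][1] = 0
--     for _ in range(50):
--         dist = [[relax(dist, x, y) for y in range(N)] for x in range(N)]
--     return sum(1 for r in dist for d in r if d <= 50)
-- ===== Notes on version B (the rewrite author's own statement) =====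
-- stated objective: alternative
-- what changed: Replaces A's FIFO-queue BFS with per-pop visited checks by Bellman-Ford-style dynamic programming: a fixed-size distance grid seeded at the start cell, relaxed for fifty rounds (each cell takes the min of its value and open-neighbour values plus one), then the in-range cells are counted; no queue, no visited set, no step counters.
import Mathlib
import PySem

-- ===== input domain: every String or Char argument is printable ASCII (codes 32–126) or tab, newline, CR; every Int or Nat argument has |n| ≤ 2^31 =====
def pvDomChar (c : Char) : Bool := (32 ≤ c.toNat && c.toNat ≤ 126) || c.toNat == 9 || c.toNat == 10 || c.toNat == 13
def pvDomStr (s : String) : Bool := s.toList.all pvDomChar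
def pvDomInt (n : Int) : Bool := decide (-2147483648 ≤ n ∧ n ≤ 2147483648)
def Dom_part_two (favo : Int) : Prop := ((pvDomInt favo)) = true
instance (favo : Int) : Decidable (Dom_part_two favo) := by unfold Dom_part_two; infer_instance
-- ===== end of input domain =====

-- B replaces A's FIFO-queue BFS by Bellman-Ford-style distance relaxation on a fixed 52×52
-- grid (50 rounds of per-cell min-relaxation, then count cells with distance ≤ 50);
-- objective: alternative algorithm, same exact count.

-- ===== PORT A =====
-- Office.is_open: bin(a).count("1") % 2 == 0  (PySem.Int.pyBin / PySem.Str.count are exact)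
def pvOpenA (favo x y : Int) : Bool :=
  PySem.Str.count (PySem.Int.pyBin (x*x + 3*x + 2*x*y + y + y*y + favo)) "1" % 2 == 0

def pvOkA (favo x y : Int) : Bool :=
  if x < 0 || y < 0 then false else pvOpenA favo x y

def pvNbrsA (favo : Int) (x y : Int) : List (Int × Int) :=
  [(x-1,y),(x+1,y),(x,y-1),(x,y+1)].filter (fun c => pvOkA favo c.1 c.2)

-- the while loop; one unit of fuel per popleft (the proof below shows the queue always
-- empties after far fewer than 1000000 pops, so the fuel-exhaustion branch is never taken)
def pvLoopA (favo : Int) : Nat → List ((Int × Int) × Int) → PySem.Set (Int × Int) → PySem.Set (Int × Int)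
  | 0, _, visited => visited
  | _+1, [], visited => visited
  | fuel+1, (c, steps) :: rest, visited =>
    if visited.contains c then pvLoopA favo fuel rest visited
    else if steps > 50 then pvLoopA favo fuel rest visited
    else pvLoopA favo fuel
      (rest ++ (pvNbrsA favo c.1 c.2).map (fun n => (n, steps+1)))
      (visited.add c)

def part_two (favo : Int) : Int :=
  PySem.Set.len (pvLoopA favo 1000000 [((1,1),0)] PySem.Set.empty)

-- ===== PORT B =====
def pvOpenB (favo x y : Int) : Bool :=
  PySem.Str.count (PySem.Int.pyBin (x*x + 3*x + 2*x*y + y + y*y + favo)) "1" % 2 == 0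

-- dist[x][y]; the proof shows every read is in range, so the defaults are never used
def pvGet2 (d : List (List Int)) (x y : Nat) : Int := (d.getD x []).getD y 51

-- relax(dist, x, y): the candidate neighbour indices are checked '0 <= n < 52' before
-- indexing, so the .toNat after the guard is exact (no negative index reaches it)
def pvRelax (favo : Int) (d : List (List Int)) (x y : Nat) : Int :=
  if !(x == 1 && y == 1) && !(pvOpenB favo (x : Int) (y : Int)) then 51
  else
    [((x:Int)-1, (y:Int)), ((x:Int)+1, (y:Int)), ((x:Int), (y:Int)-1), ((x:Int), (y:Int)+1)].foldl
      (fun best p =>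
        if decide (0 ≤ p.1) && decide (p.1 < 52) && decide (0 ≤ p.2) && decide (p.2 < 52)
            && decide (pvGet2 d p.1.toNat p.2.toNat + 1 < best) then
          pvGet2 d p.1.toNat p.2.toNat + 1
        else best)
      (pvGet2 d x y)

-- row = [51]*52; dist = 52 copies; dist[1][1] = 0
def pvInitB : List (List Int) :=
  (List.replicate 52 (List.replicate 52 (51 : Int))).set 1 ((List.replicate 52 (51 : Int)).set 1 0)

-- dist = [[relax(dist, x, y) for y in range(52)] for x in range(52)]
def pvStepB (favo : Int) (d : List (List Int)) : List (List Int) :=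
  (List.range 52).map (fun x => (List.range 52).map (fun y => pvRelax favo d x y))

-- for _ in range(50): dist = step(dist)
def pvIterB (favo : Int) : Nat → List (List Int) → List (List Int)
  | 0, d => d
  | n+1, d => pvIterB favo n (pvStepB favo d)

-- sum(1 for r in dist for v in r if v <= 50)
def part_two_alt (favo : Int) : Int :=
  (pvIterB favo 50 pvInitB).foldl
    (fun acc row => row.foldl (fun a v => if v ≤ 50 then a + 1 else a) acc) 0

-- ===== PRECONDITION & SPEC =====
def Spec_part_two (favo : Int) (out : Int) : Prop := out = part_two_alt favo
instance (favo : Int) (out : Int) : Decidable (Spec_part_two favo out) := by unfold Spec_part_two; infer_instance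

-- ===== CLAIM (what is proved, stated in full; the proofs are below) =====
def Claim_equal_part_two : Prop := ∀ (favo : Int), Dom_part_two favo → Spec_part_two favo (part_two favo)

-- ===== LEMMAS AND PROOFS =====

-- ok as a predicate on cells, and the filtered neighbour list
def pvOk (favo : Int) (c : Int × Int) : Bool := pvOkA favo c.1 c.2
def pvNb (favo : Int) (c : Int × Int) : List (Int × Int) := pvNbrsA favo c.1 c.2

-- reference "expand one level": thread visited through a key list, collecting the new keys
def pvExp (favo : Int) : PySem.Set (Int × Int) → List (Int × Int) →
    PySem.Set (Int × Int) × List (Int × Int)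
  | V, [] => (V, [])
  | V, k :: K =>
    if V.contains k then pvExp favo V K
    else
      let p := pvExp favo (V.add k) K
      (p.1, k :: p.2)

-- reference level-by-level run
def pvLevels (favo : Int) : Nat → PySem.Set (Int × Int) → List (Int × Int) → PySem.Set (Int × Int)
  | 0, V, _ => V
  | r+1, V, K =>
    let p := pvExp favo V K
    pvLevels favo r p.1 (p.2.flatMap (pvNb favo))

-- reachable from (1,1) in at most k steps, moving only onto ok cells
inductive pvReach (favo : Int) : Nat → (Int × Int) → Prop
  | base : pvReach favo 0 (1, 1)
  | mono {k c} : pvReach favo k c → pvReach favo (k+1) c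
  | step {k n c} : pvReach favo k n → c ∈ pvNb favo n → pvReach favo (k+1) c

theorem pvLevels_succ (favo : Int) (r : Nat) (V : PySem.Set (Int × Int)) (K : List (Int × Int)) :
    pvLevels favo (r+1) V K
      = pvLevels favo r (pvExp favo V K).1 ((pvExp favo V K).2.flatMap (pvNb favo)) := rfl

theorem pvAdd_eq {V : PySem.Set (Int × Int)} {k : Int × Int} (h : k ∉ V) :
    V.add k = V ++ [k] := by
  simp [PySem.Set.add, h]

theorem pvExp_mem (favo : Int) {V : PySem.Set (Int × Int)} {k : Int × Int}
    (K : List (Int × Int)) (h : k ∈ V) :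
    pvExp favo V (k :: K) = pvExp favo V K := by
  simp [pvExp, h]

theorem pvExp_new (favo : Int) {V : PySem.Set (Int × Int)} {k : Int × Int}
    (K : List (Int × Int)) (h : k ∉ V) :
    pvExp favo V (k :: K)
      = ((pvExp favo (V.add k) K).1, k :: (pvExp favo (V.add k) K).2) := by
  simp [pvExp, h]

theorem pvExp_fst (favo : Int) (K : List (Int × Int)) (V : PySem.Set (Int × Int)) :
    (pvExp favo V K).1 = V ++ (pvExp favo V K).2 := by
  induction K generalizing V with
  | nil => simp [pvExp]
  | cons k K ih =>
    by_cases h : k ∈ V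
    · rw [pvExp_mem favo _ h, ih]
    · rw [pvExp_new favo _ h]
      show (pvExp favo (V.add k) K).1 = V ++ k :: (pvExp favo (V.add k) K).2
      rw [ih (V.add k), pvAdd_eq h]
      simp

theorem pvExp_nodup (favo : Int) (K : List (Int × Int)) (V : PySem.Set (Int × Int))
    (hV : V.Nodup) : (pvExp favo V K).1.Nodup := by
  induction K generalizing V with
  | nil => simpa [pvExp]
  | cons k K ih =>
    by_cases h : k ∈ V
    · rw [pvExp_mem favo _ h]; exact ih V hV
    · rw [pvExp_new favo _ h]
      refine ih (V.add k) ?_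
      rw [pvAdd_eq h]
      simp [List.nodup_append, hV]
      intro a b hab hk
      exact h (hk ▸ hab)

theorem pvExp_snd_sub (favo : Int) (K : List (Int × Int)) (V : PySem.Set (Int × Int)) :
    ∀ k ∈ (pvExp favo V K).2, k ∈ K := by
  induction K generalizing V with
  | nil => simp [pvExp]
  | cons k K ih =>
    by_cases h : k ∈ V
    · rw [pvExp_mem favo _ h]
      intro x hx
      exact List.mem_cons_of_mem _ (ih V x hx)
    · rw [pvExp_new favo _ h]
      intro x hx
      replace hx : x ∈ k :: (pvExp favo (V.add k) K).2 := hx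
      rcases List.mem_cons.1 hx with hx | hx
      · simp [hx]
      · exact List.mem_cons_of_mem _ (ih (V.add k) x hx)

-- membership characterisations of pvExp
theorem pvExp_snd_mem (favo : Int) (K : List (Int × Int)) (V : PySem.Set (Int × Int))
    (n : Int × Int) : n ∈ (pvExp favo V K).2 ↔ n ∈ K ∧ n ∉ V := by
  induction K generalizing V with
  | nil => simp [pvExp]
  | cons k K ih =>
    by_cases h : k ∈ V
    · rw [pvExp_mem favo _ h, ih]
      constructor
      · rintro ⟨h1, h2⟩; exact ⟨List.mem_cons_of_mem _ h1, h2⟩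
      · rintro ⟨h1, h2⟩
        rcases List.mem_cons.1 h1 with rfl | h1
        · exact absurd h h2
        · exact ⟨h1, h2⟩
    · rw [pvExp_new favo _ h]
      show n ∈ k :: (pvExp favo (V.add k) K).2 ↔ _
      rw [List.mem_cons, ih]
      rw [pvAdd_eq h]
      simp only [List.mem_cons, List.mem_append]
      constructor
      · rintro (rfl | ⟨h1, h2⟩)
        · exact ⟨Or.inl rfl, h⟩
        · exact ⟨Or.inr h1, fun hv => h2 (Or.inl hv)⟩
      · rintro ⟨rfl | h1, h2⟩
        · exact Or.inl rfl
        · by_cases hnk : n = k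
          · exact Or.inl hnk
          · exact Or.inr ⟨h1, by simp [h2, hnk]⟩

theorem pvExp_fst_mem (favo : Int) (K : List (Int × Int)) (V : PySem.Set (Int × Int))
    (n : Int × Int) : n ∈ (pvExp favo V K).1 ↔ n ∈ V ∨ n ∈ K := by
  rw [pvExp_fst, List.mem_append, pvExp_snd_mem]
  by_cases h : n ∈ V
  · simp [h]
  · simp [h]

theorem pvLoopA_nil (favo : Int) (f : Nat) (V : PySem.Set (Int × Int)) :
    pvLoopA favo f [] V = V := by
  cases f <;> rfl

theorem pvLoopA_mem (favo : Int) {V : PySem.Set (Int × Int)} {c : Int × Int}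
    (s : Int) (rest : List ((Int × Int) × Int)) (f : Nat) (h : c ∈ V) :
    pvLoopA favo (f+1) ((c, s) :: rest) V = pvLoopA favo f rest V := by
  simp [pvLoopA, h]

theorem pvLoopA_skip (favo : Int) {V : PySem.Set (Int × Int)} {c : Int × Int} {s : Int}
    (rest : List ((Int × Int) × Int)) (f : Nat) (h : c ∉ V) (hs : 50 < s) :
    pvLoopA favo (f+1) ((c, s) :: rest) V = pvLoopA favo f rest V := by
  simp [pvLoopA, h, hs]

theorem pvLoopA_new (favo : Int) {V : PySem.Set (Int × Int)} {c : Int × Int} {s : Int}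
    (rest : List ((Int × Int) × Int)) (f : Nat) (h : c ∉ V) (hs : s ≤ 50) :
    pvLoopA favo (f+1) ((c, s) :: rest) V
      = pvLoopA favo f (rest ++ (pvNbrsA favo c.1 c.2).map (fun n => (n, s+1))) (V.add c) := by
  have hs' : ¬ (50 : Int) < s := by omega
  simp [pvLoopA, h, hs']

theorem pvLoopA_drop (favo : Int) (K : List (Int × Int)) (V : PySem.Set (Int × Int))
    (f : Nat) :
    pvLoopA favo (f + K.length) (K.map (fun k => (k, (51 : Int)))) V = V := by
  induction K generalizing V f with
  | nil => simpa using pvLoopA_nil favo f V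
  | cons k K ih =>
    have hlen : f + (k :: K).length = (f + K.length) + 1 := by simp only [List.length_cons]; omega
    rw [hlen, List.map_cons]
    by_cases h : k ∈ V
    · rw [pvLoopA_mem favo _ _ _ h, ih]
    · rw [pvLoopA_skip favo _ _ h (by omega), ih]

theorem pvLoopA_level (favo : Int) (s : Int) (hs : s ≤ 50) (K1 : List (Int × Int)) :
    ∀ (V : PySem.Set (Int × Int)) (Kacc : List (Int × Int)) (f : Nat),
    pvLoopA favo (f + K1.length)
        (K1.map (fun k => (k, s)) ++ Kacc.map (fun k => (k, s+1))) V
      = pvLoopA favo f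
          ((Kacc ++ (pvExp favo V K1).2.flatMap (pvNb favo)).map (fun k => (k, s+1)))
          (pvExp favo V K1).1 := by
  induction K1 with
  | nil => intro V Kacc f; simp [pvExp]
  | cons k K ih =>
    intro V Kacc f
    have hlen : f + (k :: K).length = (f + K.length) + 1 := by simp only [List.length_cons]; omega
    rw [hlen, List.map_cons, List.cons_append]
    by_cases h : k ∈ V
    · rw [pvLoopA_mem favo _ _ _ h, ih V Kacc f, pvExp_mem favo _ h]
    · rw [pvLoopA_new favo _ _ h hs]
      have hq : (K.map (fun k => (k, s)) ++ Kacc.map (fun k => (k, s+1)))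
            ++ (pvNbrsA favo k.1 k.2).map (fun n => (n, s+1))
          = K.map (fun k => (k, s)) ++ (Kacc ++ pvNb favo k).map (fun k => (k, s+1)) := by
        simp [pvNb, List.map_append, List.append_assoc]
      rw [hq, ih (V.add k) (Kacc ++ pvNb favo k) f, pvExp_new favo _ h]
      simp [List.append_assoc]

-- counting: a nodup list of cells inside the 53×53 box has at most 2809 elements
def pvInBox (v : Int × Int) : Prop := 0 ≤ v.1 ∧ v.1 ≤ 52 ∧ 0 ≤ v.2 ∧ v.2 ≤ 52

set_option maxRecDepth 4096 in
theorem pvNodup_length_le (V : List (Int × Int)) (hV : V.Nodup)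
    (hsub : ∀ v ∈ V, pvInBox v) : V.length ≤ 2809 := by
  have hWnd : (V.map (fun v => (v.1.toNat, v.2.toNat))).Nodup := by
    refine List.Nodup.map_on ?_ hV
    intro x hx y hy hxy
    obtain ⟨hx1, _, hx2, _⟩ := hsub x hx
    obtain ⟨hy1, _, hy2, _⟩ := hsub y hy
    have e1 : x.1.toNat = y.1.toNat := congrArg Prod.fst hxy
    have e2 : x.2.toNat = y.2.toNat := congrArg Prod.snd hxy
    have he : x.1 = y.1 ∧ x.2 = y.2 := by omega
    exact Prod.ext he.1 he.2
  have hWsub : (V.map (fun v => (v.1.toNat, v.2.toNat))).toFinset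
      ⊆ Finset.range 53 ×ˢ Finset.range 53 := by
    intro w hw
    rcases List.mem_map.1 (List.mem_toFinset.1 hw) with ⟨v, hv, hvw⟩
    subst hvw
    obtain ⟨h1, h2, h3, h4⟩ := hsub v hv
    simp only [Finset.mem_product, Finset.mem_range]
    omega
  have hcard : (V.map (fun v => (v.1.toNat, v.2.toNat))).toFinset.card ≤ 2809 := by
    calc (V.map (fun v => (v.1.toNat, v.2.toNat))).toFinset.card
        ≤ (Finset.range 53 ×ˢ Finset.range 53).card := Finset.card_le_card hWsub
      _ = 2809 := by simp [Finset.card_product, Finset.card_range]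
  calc V.length = (V.map (fun v => (v.1.toNat, v.2.toNat))).length := by simp
    _ = (V.map (fun v => (v.1.toNat, v.2.toNat))).toFinset.card :=
        (List.toFinset_card_of_nodup hWnd).symm
    _ ≤ 2809 := hcard

theorem pvNb_bound (favo : Int) (c c' : Int × Int) (h : c' ∈ pvNb favo c) :
    0 ≤ c'.1 ∧ 0 ≤ c'.2 ∧ c'.1 ≤ c.1 + 1 ∧ c'.2 ≤ c.2 + 1 := by
  obtain ⟨x, y⟩ := c
  simp only [pvNb, pvNbrsA, List.mem_filter] at h
  obtain ⟨hmem, hok⟩ := h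
  have hnn : 0 ≤ c'.1 ∧ 0 ≤ c'.2 := by
    by_contra hcon
    have hlt : c'.1 < 0 ∨ c'.2 < 0 := by omega
    have hb : (decide (c'.1 < 0) || decide (c'.2 < 0)) = true := by
      rcases hlt with h1 | h1 <;> simp [h1]
    simp [pvOkA, hb] at hok
  refine ⟨hnn.1, hnn.2, ?_, ?_⟩ <;>
  · simp only [List.mem_cons, List.not_mem_nil, or_false] at hmem
    rcases hmem with h | h | h | h <;> subst h <;> (simp; try omega)

theorem pvFlatMap_len (favo : Int) (L : List (Int × Int)) :
    (L.flatMap (pvNb favo)).length ≤ 4 * L.length := by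
  induction L with
  | nil => simp
  | cons c L ih =>
    have h4 : (pvNb favo c).length ≤ 4 := by
      have := List.length_filter_le (fun x => pvOkA favo x.1 x.2)
        ([(c.1-1,c.2),(c.1+1,c.2),(c.1,c.2-1),(c.1,c.2+1)] : List (Int × Int))
      simpa [pvNb, pvNbrsA] using this
    simp only [List.flatMap_cons, List.length_append, List.length_cons]
    omega

theorem pvRun (favo : Int) (r : Nat) :
    ∀ (V : PySem.Set (Int × Int)) (K : List (Int × Int)),
    V.Nodup → (∀ v ∈ V, pvInBox v) →
    (∀ k ∈ K, 0 ≤ k.1 ∧ k.1 ≤ 52 - (r : Int) ∧ 0 ≤ k.2 ∧ k.2 ≤ 52 - (r : Int)) →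
    ∃ c : Nat, c + 4 * V.length ≤ K.length + 4 * 2809 ∧
      ∀ f, pvLoopA favo (f + c) (K.map (fun k => (k, 51 - (r : Int)))) V
            = pvLevels favo r V K := by
  induction r with
  | zero =>
    intro V K hV hVbox _
    refine ⟨K.length, ?_, ?_⟩
    · have := pvNodup_length_le V hV hVbox
      omega
    · intro f
      have h51 : (51 : Int) - ((0 : Nat) : Int) = 51 := by norm_num
      rw [h51, pvLoopA_drop]
      rfl
  | succ r ih =>
    intro V K hV hVbox hK
    have hfst := pvExp_fst favo K V
    have hnodup : (pvExp favo V K).1.Nodup := pvExp_nodup favo K V hV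
    have hsub := pvExp_snd_sub favo K V
    have hKbox : ∀ k ∈ K, pvInBox k := by
      intro k hk
      obtain ⟨h1, h2, h3, h4⟩ := hK k hk
      refine ⟨h1, ?_, h3, ?_⟩ <;> push_cast at h2 h4 <;> omega
    have hV'box : ∀ v ∈ (pvExp favo V K).1, pvInBox v := by
      intro v hv
      rw [hfst] at hv
      rcases List.mem_append.1 hv with h | h
      · exact hVbox v h
      · exact hKbox v (hsub v h)
    have hK'bound : ∀ k ∈ (pvExp favo V K).2.flatMap (pvNb favo),
        0 ≤ k.1 ∧ k.1 ≤ 52 - (r : Int) ∧ 0 ≤ k.2 ∧ k.2 ≤ 52 - (r : Int) := by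
      intro k hk
      rcases List.mem_flatMap.1 hk with ⟨c, hc, hk'⟩
      obtain ⟨h1, h2, h3, h4⟩ := pvNb_bound favo c k hk'
      obtain ⟨g1, g2, g3, g4⟩ := hK c (hsub c hc)
      push_cast at g2 g4 ⊢
      omega
    obtain ⟨c', hc', heq'⟩ := ih (pvExp favo V K).1 ((pvExp favo V K).2.flatMap (pvNb favo))
      hnodup hV'box hK'bound
    have hlenp : (pvExp favo V K).1.length = V.length + (pvExp favo V K).2.length := by
      rw [hfst]; simp
    have hK'len : ((pvExp favo V K).2.flatMap (pvNb favo)).length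
        ≤ 4 * (pvExp favo V K).2.length := pvFlatMap_len favo _
    refine ⟨K.length + c', by omega, ?_⟩
    intro f
    have hcast : (51 : Int) - ((r + 1 : Nat) : Int) + 1 = 51 - (r : Int) := by
      push_cast; ring
    have hs : (51 : Int) - ((r + 1 : Nat) : Int) ≤ 50 := by push_cast; omega
    have hfuel : f + (K.length + c') = (f + c') + K.length := by omega
    have hstep := pvLoopA_level favo ((51 : Int) - ((r + 1 : Nat) : Int)) hs K V [] (f + c')
    rw [hfuel]
    have hstep' := hstep
    rw [hcast] at hstep'
    simp only [List.map_nil, List.append_nil, List.nil_append] at hstep'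
    rw [hstep', pvLevels_succ, heq' f]

-- ===== A-side: the visited set is exactly { c | pvReach favo 50 c } =====

theorem pvReach_zero_iff (favo : Int) (c : Int × Int) :
    pvReach favo 0 c ↔ c = (1, 1) := by
  constructor
  · intro h; cases h; rfl
  · rintro rfl; exact pvReach.base

theorem pvReach_succ_iff (favo : Int) (k : Nat) (c : Int × Int) :
    pvReach favo (k+1) c ↔ pvReach favo k c ∨ ∃ n, pvReach favo k n ∧ c ∈ pvNb favo n := by
  constructor
  · intro h
    cases h with
    | mono h => exact Or.inl h
    | step h hc => exact Or.inr ⟨_, h, hc⟩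
  · rintro (h | ⟨n, hn, hc⟩)
    · exact pvReach.mono h
    · exact pvReach.step hn hc

theorem pvReach_box (favo : Int) (k : Nat) (c : Int × Int) (h : pvReach favo k c) :
    0 ≤ c.1 ∧ 0 ≤ c.2 ∧ c.1 ≤ 1 + (k : Int) ∧ c.2 ≤ 1 + (k : Int) := by
  induction h with
  | base => norm_num
  | mono h ih => push_cast; push_cast at ih; omega
  | step h hc ih =>
    obtain ⟨h1, h2, h3, h4⟩ := pvNb_bound favo _ _ hc
    push_cast; push_cast at ih; omega

theorem pvReach_valid (favo : Int) (k : Nat) (c : Int × Int) (h : pvReach favo k c) :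
    c = (1, 1) ∨ pvOk favo c = true := by
  induction h with
  | base => exact Or.inl rfl
  | mono h ih => exact ih
  | step h hc ih =>
    right
    simp only [pvNb, pvNbrsA, List.mem_filter] at hc
    exact hc.2

theorem pvLevels_reach (favo : Int) (r : Nat) :
    ∀ (t : Nat) (V : PySem.Set (Int × Int)) (K : List (Int × Int)),
    V.Nodup →
    (∀ c, c ∈ V ↔ pvReach favo t c) →
    (∀ c, (c ∈ V ∨ c ∈ K) ↔ pvReach favo (t+1) c) →
    (pvLevels favo r V K).Nodup ∧ ∀ c, c ∈ pvLevels favo r V K ↔ pvReach favo (t+r) c := by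
  induction r with
  | zero =>
    intro t V K hV hVmem _
    exact ⟨hV, by simpa [pvLevels] using hVmem⟩
  | succ r ih =>
    intro t V K hV hVmem hVK
    rw [pvLevels_succ]
    have hV' : (pvExp favo V K).1.Nodup := pvExp_nodup favo K V hV
    have hmemV' : ∀ c, c ∈ (pvExp favo V K).1 ↔ pvReach favo (t+1) c := by
      intro c
      rw [pvExp_fst_mem]
      exact hVK c
    have hK' : ∀ c, (c ∈ (pvExp favo V K).1 ∨ c ∈ (pvExp favo V K).2.flatMap (pvNb favo))
        ↔ pvReach favo (t+1+1) c := by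
      intro c
      constructor
      · rintro (hc | hc)
        · exact pvReach.mono ((hmemV' c).1 hc)
        · rcases List.mem_flatMap.1 hc with ⟨n, hn, hcn⟩
          have := (pvExp_snd_mem favo K V n).1 hn
          exact pvReach.step ((hVK n).1 (Or.inr this.1)) hcn
      · intro hc
        rcases (pvReach_succ_iff favo (t+1) c).1 hc with hc | ⟨n, hn, hcn⟩
        · exact Or.inl ((hmemV' c).2 hc)
        · by_cases hnt : pvReach favo t n
          · exact Or.inl ((hmemV' c).2 (pvReach.step hnt hcn))
          · have hnV : n ∉ V := fun h => hnt ((hVmem n).1 h)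
            have hnK : n ∈ K := by
              rcases (hVK n).2 hn with h | h
              · exact absurd h hnV
              · exact h
            exact Or.inr (List.mem_flatMap.2
              ⟨n, (pvExp_snd_mem favo K V n).2 ⟨hnK, hnV⟩, hcn⟩)
    have := ih (t+1) (pvExp favo V K).1 ((pvExp favo V K).2.flatMap (pvNb favo))
      hV' hmemV' hK'
    refine ⟨this.1, fun c => ?_⟩
    rw [this.2 c]
    have : t + 1 + r = t + (r + 1) := by omega
    rw [this]

theorem pvVisited_reach (favo : Int) :
    (pvLevels favo 51 PySem.Set.empty [(1,1)]).Nodup ∧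
    ∀ c, c ∈ pvLevels favo 51 PySem.Set.empty [(1,1)] ↔ pvReach favo 50 c := by
  have hexp : pvExp favo PySem.Set.empty [(1,1)]
      = ([((1,1) : Int × Int)], [((1,1) : Int × Int)]) := by
    have h : ((1,1) : Int × Int) ∉ (PySem.Set.empty : PySem.Set (Int × Int)) := by
      simp [PySem.Set.empty]
    rw [pvExp_new favo _ h]
    simp [pvExp, PySem.Set.add, PySem.Set.empty]
  have h51 : pvLevels favo 51 PySem.Set.empty [(1,1)]
      = pvLevels favo 50 [((1,1) : Int × Int)] (pvNb favo (1,1)) := by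
    show pvLevels favo (50+1) PySem.Set.empty [(1,1)] = _
    rw [pvLevels_succ, hexp]
    simp
  rw [h51]
  have := pvLevels_reach favo 50 0 [((1,1) : Int × Int)] (pvNb favo (1,1))
    (by simp)
    (by intro c; simp [pvReach_zero_iff])
    (by
      intro c
      rw [pvReach_succ_iff]
      simp only [List.mem_singleton, pvReach_zero_iff]
      constructor
      · rintro (rfl | h)
        · exact Or.inl rfl
        · exact Or.inr ⟨(1,1), rfl, h⟩
      · rintro (rfl | ⟨n, rfl, h⟩)
        · exact Or.inl rfl
        · exact Or.inr h)
  simpa using this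

-- ===== B-side: grid reading and the relaxation invariant =====

def pvP (favo : Int) (k : Nat) (x y : Nat) : Int := pvGet2 (pvIterB favo k pvInitB) x y

theorem pvIterB_succ (favo : Int) (n : Nat) (d : List (List Int)) :
    pvIterB favo (n+1) d = pvStepB favo (pvIterB favo n d) := by
  induction n generalizing d with
  | zero => rfl
  | succ n ih =>
    show pvIterB favo (n+1) (pvStepB favo d) = _
    rw [ih (pvStepB favo d)]
    rfl

theorem pvGet2_stepB (favo : Int) (d : List (List Int)) (x y : Nat)
    (hx : x < 52) (hy : y < 52) :
    pvGet2 (pvStepB favo d) x y = pvRelax favo d x y := by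
  unfold pvGet2 pvStepB
  rw [List.getD_eq_getElem?_getD (l := (List.range 52).map _), List.getElem?_map,
    List.getElem?_range hx]
  simp only [Option.map_some, Option.getD_some]
  rw [List.getD_eq_getElem?_getD, List.getElem?_map, List.getElem?_range hy]
  rfl

theorem pvP_zero (favo : Int) (x y : Nat) (hx : x < 52) (hy : y < 52) :
    pvP favo 0 x y = if x = 1 ∧ y = 1 then 0 else 51 := by
  show pvGet2 pvInitB x y = _
  unfold pvGet2 pvInitB
  have hrow : ∀ z : Nat, z < 52 →
      ((List.replicate 52 (51 : Int)).set 1 0).getD z 51 = if z = 1 then 0 else 51 := by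
    intro z hz
    rw [List.getD_eq_getElem?_getD, List.getElem?_set]
    by_cases h : z = 1
    · simp [h]
    · rw [if_neg (fun hh => h hh.symm), List.getElem?_replicate, if_pos hz]
      simp [h]
  have hrep : ∀ z : Nat, z < 52 →
      (List.replicate 52 (51 : Int)).getD z 51 = 51 := by
    intro z hz
    rw [List.getD_eq_getElem?_getD, List.getElem?_replicate, if_pos hz]
    rfl
  rw [List.getD_eq_getElem?_getD (a := ([] : List Int)), List.getElem?_set]
  by_cases h1 : x = 1
  · rw [if_pos h1.symm, if_pos (by simp)]
    simp only [Option.getD_some]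
    rw [hrow y hy]
    by_cases h2 : y = 1 <;> simp [h1, h2]
  · rw [if_neg (fun hh => h1 hh.symm), List.getElem?_replicate, if_pos hx]
    simp only [Option.getD_some]
    rw [hrep y hy]
    simp [h1]

theorem pvP_succ (favo : Int) (k : Nat) (x y : Nat) (hx : x < 52) (hy : y < 52) :
    pvP favo (k+1) x y = pvRelax favo (pvIterB favo k pvInitB) x y := by
  show pvGet2 (pvIterB favo (k+1) pvInitB) x y = _
  rw [pvIterB_succ, pvGet2_stepB favo _ x y hx hy]

-- fold-min facts (the fold in pvRelax), for an arbitrary guard/value pair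
theorem pvFold_le_init {α : Type} (g : α → Bool) (v : α → Int) (l : List α) (b : Int) :
    l.foldl (fun best p => if g p && decide (v p < best) then v p else best) b ≤ b := by
  induction l generalizing b with
  | nil => exact le_refl b
  | cons a l ih =>
    rw [List.foldl_cons]
    refine le_trans (ih _) ?_
    split_ifs with h
    · rw [Bool.and_eq_true] at h
      have : v a < b := by simpa using h.2
      omega
    · exact le_refl b

theorem pvFold_le_mem {α : Type} (g : α → Bool) (v : α → Int) (l : List α) (b : Int)
    (p : α) (hp : p ∈ l) (hg : g p = true) :
    l.foldl (fun best p => if g p && decide (v p < best) then v p else best) b ≤ v p := by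
  induction l generalizing b with
  | nil => cases hp
  | cons a l ih =>
    rw [List.foldl_cons]
    rcases List.mem_cons.1 hp with rfl | hp
    · by_cases hlt : v p < b
      · rw [if_pos (by simp [hg, hlt])]
        exact pvFold_le_init g v l (v p)
      · have : (if g p && decide (v p < b) then v p else b) = b := by
          simp [hlt]
        rw [this]
        refine le_trans (pvFold_le_init g v l b) ?_
        omega
    · exact ih _ hp

theorem pvFold_cases {α : Type} (g : α → Bool) (v : α → Int) (l : List α) (b : Int) :
    l.foldl (fun best p => if g p && decide (v p < best) then v p else best) b = b ∨
    ∃ p ∈ l, g p = true ∧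
      l.foldl (fun best p => if g p && decide (v p < best) then v p else best) b = v p := by
  induction l generalizing b with
  | nil => exact Or.inl rfl
  | cons a l ih =>
    rw [List.foldl_cons]
    by_cases hc : (g a && decide (v a < b)) = true
    · rw [if_pos hc]
      rcases ih (v a) with h | ⟨p, hp, hg, h⟩
      · rw [Bool.and_eq_true] at hc
        exact Or.inr ⟨a, List.mem_cons_self, hc.1, h⟩
      · exact Or.inr ⟨p, List.mem_cons_of_mem _ hp, hg, h⟩
    · rw [if_neg hc]
      rcases ih b with h | ⟨p, hp, hg, h⟩
      · exact Or.inl h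
      · exact Or.inr ⟨p, List.mem_cons_of_mem _ hp, hg, h⟩

-- the invariant: after k rounds the grid knows exactly the cells reachable within j ≤ k steps
def pvInv (favo : Int) (k : Nat) : Prop :=
  ∀ x y : Nat, x < 52 → y < 52 →
    (∀ j : Nat, j ≤ k → (pvP favo k x y ≤ (j : Int) ↔ pvReach favo j ((x : Int), (y : Int)))) ∧
    (pvP favo k x y = 51 ∨ (0 ≤ pvP favo k x y ∧ pvP favo k x y ≤ (k : Int)))

theorem pvReach_oneone (favo : Int) (j : Nat) : pvReach favo j (1, 1) := by
  induction j with
  | zero => exact pvReach.base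
  | succ j ih => exact pvReach.mono ih

theorem pvCands_symm (x y : Int) (p : Int × Int)
    (hp : p ∈ [(x-1,y),(x+1,y),(x,y-1),(x,y+1)]) :
    (x, y) ∈ [(p.1-1,p.2),(p.1+1,p.2),(p.1,p.2-1),(p.1,p.2+1)] := by
  simp only [List.mem_cons, List.not_mem_nil, or_false] at hp ⊢
  rcases hp with rfl | rfl | rfl | rfl
  · exact Or.inr (Or.inl (by rw [Prod.mk.injEq]; exact ⟨by omega, rfl⟩))
  · exact Or.inl (by rw [Prod.mk.injEq]; exact ⟨by omega, rfl⟩)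
  · exact Or.inr (Or.inr (Or.inr (by rw [Prod.mk.injEq]; exact ⟨rfl, by omega⟩)))
  · exact Or.inr (Or.inr (Or.inl (by rw [Prod.mk.injEq]; exact ⟨rfl, by omega⟩)))

theorem pvNb_mem_iff (favo : Int) (n c : Int × Int) :
    c ∈ pvNb favo n ↔ c ∈ [(n.1-1,n.2),(n.1+1,n.2),(n.1,n.2-1),(n.1,n.2+1)]
      ∧ pvOkA favo c.1 c.2 = true := by
  simp [pvNb, pvNbrsA, List.mem_filter]

theorem pvOkA_natCast (favo : Int) (x y : Nat) :
    pvOkA favo (x : Int) (y : Int) = pvOpenB favo (x : Int) (y : Int) := by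
  unfold pvOkA
  rw [if_neg]
  · rfl
  · simp

theorem pvInv_zero (favo : Int) : pvInv favo 0 := by
  intro x y hx hy
  constructor
  · intro j hj
    have hj0 : j = 0 := by omega
    subst hj0
    rw [pvP_zero favo x y hx hy, pvReach_zero_iff]
    by_cases h : x = 1 ∧ y = 1
    · rw [if_pos h]
      obtain ⟨rfl, rfl⟩ := h
      simp
    · rw [if_neg h]
      constructor
      · intro hle; exfalso; omega
      · intro he
        exfalso
        rw [Prod.mk.injEq] at he
        exact h ⟨by omega, by omega⟩
  · rw [pvP_zero favo x y hx hy]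
    by_cases h : x = 1 ∧ y = 1
    · rw [if_pos h]; right; norm_num
    · rw [if_neg h]; left; rfl

theorem pvInv_succ (favo : Int) (k : Nat) (hk : k ≤ 49) (ih : pvInv favo k) :
    pvInv favo (k+1) := by
  intro x y hx hy
  have hrelax := pvP_succ favo k x y hx hy
  by_cases hval : (x = 1 ∧ y = 1) ∨ pvOpenB favo (x : Int) (y : Int) = true
  case neg =>
    have h1 : ¬ (x = 1 ∧ y = 1) := fun h => hval (Or.inl h)
    have h2 : pvOpenB favo (x : Int) (y : Int) = false := by
      cases hb : pvOpenB favo (x : Int) (y : Int)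
      · rfl
      · exact absurd (Or.inr hb) hval
    have hP : pvP favo (k+1) x y = 51 := by
      rw [hrelax]
      unfold pvRelax
      rw [if_pos]
      rw [h2]
      simp only [Bool.not_false, Bool.and_true, Bool.not_eq_true']
      rw [Bool.eq_false_iff]
      intro hb
      rw [Bool.and_eq_true] at hb
      exact h1 ⟨by simpa using hb.1, by simpa using hb.2⟩
    refine ⟨?_, Or.inl hP⟩
    intro j hj
    rw [hP]
    constructor
    · intro hle; exfalso; omega
    · intro hr
      exfalso
      rcases pvReach_valid favo j _ hr with h | h
      · rw [Prod.mk.injEq] at h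
        exact h1 ⟨by omega, by omega⟩
      · have := pvOkA_natCast favo x y
        rw [pvOk] at h
        simp only at h
        rw [this, h2] at h
        cases h
  case pos =>
    -- valid cell: the relaxation is the guarded min-fold
    have hcond : (!(x == 1 && y == 1) && !(pvOpenB favo (x : Int) (y : Int))) = false := by
      rcases hval with ⟨rfl, rfl⟩ | h
      · simp
      · rw [h]; simp
    set d := pvIterB favo k pvInitB with hd
    set G : Int × Int → Bool := fun p =>
      decide (0 ≤ p.1) && decide (p.1 < 52) && decide (0 ≤ p.2) && decide (p.2 < 52) with hG
    set v : Int × Int → Int := fun p => pvGet2 d p.1.toNat p.2.toNat + 1 with hv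
    set L : List (Int × Int) :=
      [((x:Int)-1, (y:Int)), ((x:Int)+1, (y:Int)), ((x:Int), (y:Int)-1), ((x:Int), (y:Int)+1)]
      with hL
    have hfold : pvP favo (k+1) x y
        = L.foldl (fun best p => if G p && decide (v p < best) then v p else best)
            (pvP favo k x y) := by
      rw [hrelax]
      unfold pvRelax
      rw [if_neg (by rw [hcond]; simp)]
      rfl
    have hok_c : ((x:Int), (y:Int)) = ((1:Int), (1:Int)) ∨ pvOkA favo (x:Int) (y:Int) = true := by
      rcases hval with ⟨rfl, rfl⟩ | h
      · left; rfl
      · right; rw [pvOkA_natCast]; exact h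
    -- facts from the previous round at (x, y)
    obtain ⟨ihj, ihb⟩ := ih x y hx hy
    -- facts from the previous round at an in-box candidate p
    have ihp : ∀ p : Int × Int, G p = true →
        (∀ j : Nat, j ≤ k → (pvGet2 d p.1.toNat p.2.toNat ≤ (j : Int) ↔ pvReach favo j p)) ∧
        (pvGet2 d p.1.toNat p.2.toNat = 51 ∨
          (0 ≤ pvGet2 d p.1.toNat p.2.toNat ∧ pvGet2 d p.1.toNat p.2.toNat ≤ (k : Int))) := by
      intro p hp
      rw [hG] at hp
      simp only [Bool.and_eq_true, decide_eq_true_eq] at hp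
      obtain ⟨⟨⟨hp1, hp2⟩, hp3⟩, hp4⟩ := hp
      have hx' : p.1.toNat < 52 := by omega
      have hy' : p.2.toNat < 52 := by omega
      have hcast : ((p.1.toNat : Int), (p.2.toNat : Int)) = p := by
        rw [Prod.ext_iff]
        constructor <;> simp <;> omega
      obtain ⟨a1, a2⟩ := ih p.1.toNat p.2.toNat hx' hy'
      rw [hcast] at a1
      exact ⟨a1, a2⟩
    have hfold_le_init := pvFold_le_init G v L (pvP favo k x y)
    rw [← hfold] at hfold_le_init
    constructor
    · intro j hj
      constructor
      · -- P (k+1) ≤ j → reachable in j steps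
        intro hle
        rcases pvFold_cases G v L (pvP favo k x y) with hc | ⟨p, hpL, hpg, hc⟩
        · rw [← hfold] at hc
          rw [hc] at hle
          by_cases hjk : j ≤ k
          · exact (ihj j hjk).1 hle
          · have hj' : j = k + 1 := by omega
            subst hj'
            rcases ihb with hb | ⟨_, hb⟩
            · exfalso; omega
            · exact pvReach.mono ((ihj k le_rfl).1 hb)
        · rw [← hfold] at hc
          rw [hc] at hle
          obtain ⟨p1, p2⟩ := ihp p hpg
          rw [hv] at hle
          simp only at hle
          rcases p2 with hb | ⟨hb0, hbk⟩
          · exfalso; rw [hb] at hle; omega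
          · have hj1 : 1 ≤ j := by omega
            have hjm : j - 1 ≤ k := by omega
            have hr : pvReach favo (j-1) p := by
              refine (p1 (j-1) hjm).1 ?_
              have : ((j - 1 : Nat) : Int) = (j : Int) - 1 := by omega
              omega
            have hstep : pvReach favo (j-1+1) ((x:Int), (y:Int)) := by
              rcases hok_c with hc11 | hokc
              · rw [hc11]; exact pvReach_oneone favo _
              · refine pvReach.step hr ?_
                rw [pvNb_mem_iff]
                refine ⟨?_, hokc⟩
                have := pvCands_symm (x:Int) (y:Int) p (by rw [hL] at hpL; exact hpL)
                exact this
            have : j - 1 + 1 = j := by omega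
            rw [this] at hstep
            exact hstep
      · -- reachable in j steps → P (k+1) ≤ j
        intro hr
        by_cases hjk : j ≤ k
        · have := (ihj j hjk).2 hr
          omega
        · have hj' : j = k + 1 := by omega
          subst hj'
          rcases (pvReach_succ_iff favo k _).1 hr with hrk | ⟨n, hn, hcn⟩
          · have := (ihj k le_rfl).2 hrk
            omega
          · -- n is an in-box candidate of (x, y)
            obtain ⟨hb1, hb2, hb3, hb4⟩ := pvReach_box favo k n hn
            have hnbox : G n = true := by
              rw [hG]
              simp only [Bool.and_eq_true, decide_eq_true_eq]
              refine ⟨⟨⟨hb1, ?_⟩, hb2⟩, ?_⟩ <;> omega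
            have hnL : n ∈ L := by
              rw [pvNb_mem_iff] at hcn
              obtain ⟨hmem, -⟩ := hcn
              simp only [List.mem_cons, List.not_mem_nil, or_false] at hmem
              rw [hL]
              simp only [List.mem_cons, List.not_mem_nil, or_false]
              rcases hmem with h | h | h | h <;> rw [Prod.mk.injEq] at h <;>
                obtain ⟨e1, e2⟩ := h
              · exact Or.inr (Or.inl (Prod.ext (by omega) (by omega)))
              · exact Or.inl (Prod.ext (by omega) (by omega))
              · exact Or.inr (Or.inr (Or.inr (Prod.ext (by omega) (by omega))))
              · exact Or.inr (Or.inr (Or.inl (Prod.ext (by omega) (by omega))))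
            have hle := pvFold_le_mem G v L (pvP favo k x y) n hnL hnbox
            rw [← hfold] at hle
            obtain ⟨p1, _⟩ := ihp n hnbox
            have := (p1 k le_rfl).2 hn
            rw [hv] at hle
            simp only at hle
            push_cast
            omega
    · -- value bound
      rcases pvFold_cases G v L (pvP favo k x y) with hc | ⟨p, hpL, hpg, hc⟩
      · rw [← hfold] at hc
        rw [hc]
        rcases ihb with hb | ⟨hb0, hbk⟩
        · exact Or.inl hb
        · right; constructor
          · exact hb0
          · push_cast; omega
      · rw [← hfold] at hc
        obtain ⟨_, p2⟩ := ihp p hpg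
        rcases p2 with hb | ⟨hb0, hbk⟩
        · exfalso
          rw [hc, hv] at hfold_le_init
          simp only at hfold_le_init
          rw [hb] at hfold_le_init
          rcases ihb with hbb | ⟨_, hbb⟩
          · omega
          · omega
        · right
          rw [hc, hv]
          simp only
          constructor
          · omega
          · push_cast; omega

theorem pvInv_50 (favo : Int) : pvInv favo 50 := by
  have H : ∀ k, k ≤ 50 → pvInv favo k := by
    intro k
    induction k with
    | zero => intro _; exact pvInv_zero favo
    | succ k ihk => intro h; exact pvInv_succ favo k (by omega) (ihk (by omega))
  exact H 50 le_rfl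

-- ===== counting =====

theorem pvRow_count (row : List Int) (acc : Int) :
    row.foldl (fun a v => if v ≤ 50 then a + 1 else a) acc
      = acc + (row.countP (fun v => decide (v ≤ 50)) : Int) := by
  induction row generalizing acc with
  | nil => simp
  | cons v row ih =>
    rw [List.foldl_cons, ih, List.countP_cons]
    by_cases h : v ≤ 50
    · simp [h]; omega
    · simp [h]

theorem pvFoldl_ext (f g : Int → Nat → Int) (l : List Nat)
    (h : ∀ acc x, x ∈ l → f acc x = g acc x) :
    ∀ acc, l.foldl f acc = l.foldl g acc := by
  induction l with
  | nil => intro acc; rfl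
  | cons x l ih =>
    intro acc
    rw [List.foldl_cons, List.foldl_cons, h acc x List.mem_cons_self]
    exact ih (fun a z hz => h a z (List.mem_cons_of_mem _ hz)) _

theorem pvFoldl_add (f : Nat → Int) (l : List Nat) (acc : Int) :
    l.foldl (fun a x => a + f x) acc = acc + (l.map f).sum := by
  induction l generalizing acc with
  | nil => simp
  | cons x l ih => rw [List.foldl_cons, ih]; simp; omega

theorem pvSum_cast (f : Nat → Nat) (l : List Nat) :
    (l.map (fun x => ((f x : Nat) : Int))).sum = (((l.map f).sum : Nat) : Int) := by
  induction l with
  | nil => simp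
  | cons x l ih => simp [ih]

theorem pvBlocks_nodup (g : Nat → List (Int × Int)) (l : List Nat) (hnd : l.Nodup)
    (hblock : ∀ x, (g x).Nodup) (hfst : ∀ x c, c ∈ g x → c.1 = (x : Int)) :
    (l.flatMap g).Nodup := by
  induction l with
  | nil => simp
  | cons a l ih =>
    rw [List.flatMap_cons, List.nodup_append]
    refine ⟨hblock a, ih hnd.of_cons, ?_⟩
    intro c hc c' hc' hcc
    rcases List.mem_flatMap.1 hc' with ⟨x, hx, hcx⟩
    have h1 := hfst a c hc
    have h2 := hfst x c' hcx
    rw [hcc] at h1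
    have : a = x := by omega
    subst this
    exact (List.nodup_cons.1 hnd).1 hx

theorem part_two_alt_count (favo : Int) :
    part_two_alt favo
      = (((List.range 52).flatMap (fun x =>
          ((List.range 52).filter (fun y => decide (pvP favo 50 x y ≤ 50))).map
            (fun (y : Nat) => ((x : Int), (y : Int))))).length : Int) := by
  have hG : pvIterB favo 50 pvInitB
      = (List.range 52).map (fun x => (List.range 52).map
          (fun y => pvRelax favo (pvIterB favo 49 pvInitB) x y)) := by
    rw [show (50 : Nat) = 49 + 1 from rfl, pvIterB_succ]
    rfl
  have hPval : ∀ x y : Nat, x < 52 → y < 52 →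
      pvRelax favo (pvIterB favo 49 pvInitB) x y = pvP favo 50 x y := by
    intro x y hx hy
    exact (pvP_succ favo 49 x y hx hy).symm
  unfold part_two_alt
  rw [hG, List.foldl_map]
  rw [pvFoldl_ext _ (fun acc x => acc + (((List.range 52).countP
        (fun y => decide (pvP favo 50 x y ≤ 50))) : Int)) _ ?_ 0]
  · rw [pvFoldl_add]
    rw [List.length_flatMap]
    have hmapeq : (List.range 52).map (fun x =>
          (((List.range 52).filter (fun y => decide (pvP favo 50 x y ≤ 50))).map
            (fun (y : Nat) => ((x : Int), (y : Int)))).length)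
        = (List.range 52).map (fun x =>
            (List.range 52).countP (fun y => decide (pvP favo 50 x y ≤ 50))) := by
      refine List.map_congr_left ?_
      intro x _
      rw [List.length_map, ← List.countP_eq_length_filter]
    rw [hmapeq]
    rw [pvSum_cast (fun x => (List.range 52).countP
          (fun y => decide (pvP favo 50 x y ≤ 50)))]
    omega
  · intro acc x hx
    rw [List.mem_range] at hx
    rw [pvRow_count, List.countP_map]
    congr 1
    refine congrArg _ (List.countP_congr ?_)
    intro y hy
    rw [List.mem_range] at hy
    simp only [Function.comp_apply]
    rw [hPval x y hx hy]

theorem part_two_spec' (favo : Int) : part_two favo = part_two_alt favo := by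
  -- A's loop runs to the level decomposition
  obtain ⟨c, hc, heq⟩ := pvRun favo 51 PySem.Set.empty [(1,1)]
    (by simp [PySem.Set.empty]) (by simp [PySem.Set.empty])
    (by intro k hk; simp at hk; subst hk; norm_num)
  have hcle : c ≤ 1000000 := by
    simp [PySem.Set.empty] at hc
    omega
  have h1 := heq (1000000 - c)
  have h2 : 1000000 - c + c = 1000000 := by omega
  rw [h2] at h1
  have h3 : (([(1,1)] : List (Int × Int)).map (fun k => (k, (51 : Int) - ((51 : Nat) : Int))))
      = [(((1,1) : Int × Int), (0 : Int))] := by norm_num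
  rw [h3] at h1
  have hA : part_two favo = ((pvLevels favo 51 PySem.Set.empty [(1,1)]).length : Int) := by
    unfold part_two
    rw [h1]
    rfl
  obtain ⟨hnodupV, hmemV⟩ := pvVisited_reach favo
  -- the flat list of counted grid cells
  have hmemLB : ∀ c : Int × Int,
      (c ∈ (List.range 52).flatMap (fun x =>
        ((List.range 52).filter (fun y => decide (pvP favo 50 x y ≤ 50))).map
          (fun (y : Nat) => ((x : Int), (y : Int))))) ↔ pvReach favo 50 c := by
    intro c
    simp only [List.mem_flatMap, List.mem_map, List.mem_filter, List.mem_range,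
      decide_eq_true_eq]
    constructor
    · rintro ⟨x, hx, y, ⟨hy, hP⟩, rfl⟩
      exact (((pvInv_50 favo) x y hx hy).1 50 le_rfl).1 (by exact_mod_cast hP)
    · intro hr
      obtain ⟨hb1, hb2, hb3, hb4⟩ := pvReach_box favo 50 c hr
      have hx : c.1.toNat < 52 := by omega
      have hy : c.2.toNat < 52 := by omega
      have hcast : ((c.1.toNat : Int), (c.2.toNat : Int)) = c := by
        rw [Prod.ext_iff]
        constructor <;> simp <;> omega
      refine ⟨c.1.toNat, hx, c.2.toNat, ⟨hy, ?_⟩, hcast⟩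
      have := (((pvInv_50 favo) c.1.toNat c.2.toNat hx hy).1 50 le_rfl).2
        (by rw [hcast]; exact hr)
      exact_mod_cast this
  have hnodupLB : ((List.range 52).flatMap (fun x =>
      ((List.range 52).filter (fun y => decide (pvP favo 50 x y ≤ 50))).map
        (fun (y : Nat) => ((x : Int), (y : Int))))).Nodup := by
    refine pvBlocks_nodup _ _ List.nodup_range ?_ ?_
    · intro x
      refine List.Nodup.map ?_ (List.Nodup.filter _ List.nodup_range)
      intro a b hab
      rw [Prod.mk.injEq] at hab
      exact_mod_cast hab.2
    · intro x c hc
      rcases List.mem_map.1 hc with ⟨y, _, rfl⟩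
      rfl
  have hperm : (pvLevels favo 51 PySem.Set.empty [(1,1)]).Perm
      ((List.range 52).flatMap (fun x =>
        ((List.range 52).filter (fun y => decide (pvP favo 50 x y ≤ 50))).map
          (fun (y : Nat) => ((x : Int), (y : Int))))) := by
    rw [List.perm_ext_iff_of_nodup hnodupV hnodupLB]
    intro c
    rw [hmemV c, hmemLB c]
  rw [hA, part_two_alt_count favo, hperm.length_eq]

-- ===== VERDICT (by name: the statement is the Claim_ definition above) =====
theorem part_two_spec : Claim_equal_part_two := by
  intro favo _
  exact part_two_spec' favo
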